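-- pv_equiv track=rewrite | github.com/Texas-Toasty/Spring-2024 | NameFormatter.py | initials_obtain
-- ===== SOURCE A (Python) =====
-- def initials_obtain(spaceless_name):
--     initials = ''
--     i = 0
--     while i < len(spaceless_name):
--         if spaceless_name[i].isupper():
--             initials += spaceless_name[i].upper()
--             i += 1
--             while i < len(spaceless_name) and spaceless_name[i].islower():
--                 i += 1
--             if i < len(spaceless_name):
--                 initials += '.'
--         else:
--             i += 1
--     return initials
-- ===== SOURCE B (Python) =====
-- def initials_obtain(spaceless_name):
--     n = len(spaceless_name)
--     suffix = [False] * (n + 1)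
--     for i in range(n - 1, -1, -1):
--         suffix[i] = suffix[i + 1] or not spaceless_name[i].islower()
--     out = []
--     for i, c in enumerate(spaceless_name):
--         if c.isupper():
--             out.append(c.upper())
--             if suffix[i + 1]:
--                 out.append('.')
--     return ''.join(out)
-- ===== Notes on version B (the rewrite author's own statement) =====
-- stated objective: alternative
-- what changed: Replaces A's single-pass state machine (emit uppercase, inner loop skipping the lowercase run, conditional dot) by a two-pass formulation: first a right-to-left boolean suffix table recording whether any non-lowercase character occurs at or after each position, then one forward pass over the enumerated characters emitting each uppercase letter plus a dot iff the table entry after it is true.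
import Mathlib
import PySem

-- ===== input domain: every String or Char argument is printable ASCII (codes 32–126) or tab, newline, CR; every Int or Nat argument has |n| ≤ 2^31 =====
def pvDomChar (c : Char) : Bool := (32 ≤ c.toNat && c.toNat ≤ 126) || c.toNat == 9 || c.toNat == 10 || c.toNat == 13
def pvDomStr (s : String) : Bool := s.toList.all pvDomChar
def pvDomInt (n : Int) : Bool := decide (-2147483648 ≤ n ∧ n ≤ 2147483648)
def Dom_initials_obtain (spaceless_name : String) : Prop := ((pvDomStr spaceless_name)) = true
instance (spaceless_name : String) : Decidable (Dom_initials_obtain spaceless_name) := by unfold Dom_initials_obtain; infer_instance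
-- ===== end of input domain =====

-- B replaces A's single-pass state machine (emit uppercase, skip the lowercase run,
-- maybe emit '.') by a two-pass formulation: a right-to-left boolean suffix table
-- "some non-lowercase char at position ≥ i", then one forward pass over the indexed
-- characters; objective: an alternative decomposition of the same cost.

-- ===== PORT A =====
-- outer while loop of A; the inner "skip lowercase" while loop is the dropWhile
def pvInitialsA : List Char → List Char
  | [] => []
  | c :: rest =>
    if PySem.Chars.isupper c then
      let rest' := rest.dropWhile PySem.Chars.islower
      PySem.Chars.upperChar c :: ((if rest' = [] then [] else ['.']) ++ pvInitialsA rest')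
    else pvInitialsA rest
termination_by l => l.length
decreasing_by
  · have := List.length_dropWhile_le PySem.Chars.islower rest
    simp; omega
  · simp

def initials_obtain (spaceless_name : String) : String :=
  String.mk (pvInitialsA spaceless_name.toList)

-- ===== PORT B =====
-- Source B's right-to-left loop filling suffix[i] = suffix[i+1] or not s[i].islower()
def pvSuffixB (cs : List Char) : List Bool :=
  cs.foldr (fun c acc => (acc.headD false || !PySem.Chars.islower c) :: acc) [false]

-- Source B's forward pass: for i, c in enumerate(s): if c.isupper(): emit c.upper() [+ '.' if suffix[i+1]]
def initials_obtain_alt (spaceless_name : String) : String :=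
  let cs := spaceless_name.toList
  let suffix := pvSuffixB cs
  String.mk ((cs.zipIdx).flatMap (fun p =>
    if PySem.Chars.isupper p.1 then
      PySem.Chars.upperChar p.1 :: (if suffix.getD (p.2 + 1) false then ['.'] else [])
    else []))

-- ===== PRECONDITION & SPEC =====
def Spec_initials_obtain (spaceless_name : String) (out : String) : Prop := out = initials_obtain_alt spaceless_name
instance (spaceless_name : String) (out : String) : Decidable (Spec_initials_obtain spaceless_name out) := by unfold Spec_initials_obtain; infer_instance

-- ===== CLAIM (what is proved, stated in full; the proofs are below) =====
def Claim_equal_initials_obtain : Prop := ∀ (spaceless_name : String), Dom_initials_obtain spaceless_name → Spec_initials_obtain spaceless_name (initials_obtain spaceless_name)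

-- ===== LEMMAS AND PROOFS =====

theorem pv_lower_not_upper (c : Char) (h : PySem.Chars.islower c = true) :
    PySem.Chars.isupper c = false := by
  simp only [PySem.Chars.islower, PySem.Chars.isupper, Bool.and_eq_true, decide_eq_true_eq,
    Char.le_def, UInt32.le_iff_toNat_le] at h ⊢
  simp only [Bool.and_eq_false_iff, decide_eq_false_iff_not]
  have h1 : ('a').val.toNat = 97 := rfl
  have h2 : ('z').val.toNat = 122 := rfl
  have h3 : ('A').val.toNat = 65 := rfl
  have h4 : ('Z').val.toNat = 90 := rfl
  omega

-- A ignores the lowercase characters it would skip anyway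
theorem pvInitialsA_dropWhile (l : List Char) :
    pvInitialsA (l.dropWhile PySem.Chars.islower) = pvInitialsA l := by
  induction l with
  | nil => rfl
  | cons c rest ih =>
    by_cases h : PySem.Chars.islower c = true
    · rw [List.dropWhile_cons_of_pos h, ih, pvInitialsA]
      simp [pv_lower_not_upper c h]
    · rw [List.dropWhile_cons_of_neg h]

-- the suffix table of B says "some non-lowercase character at position ≥ k"
theorem pvSuffixB_getD (cs : List Char) (k : Nat) :
    (pvSuffixB cs).getD k false = (cs.drop k).any (fun c => !PySem.Chars.islower c) := by
  induction cs generalizing k with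
  | nil => cases k <;> simp [pvSuffixB]
  | cons c rest ih =>
    have hhead : (pvSuffixB rest).headD false = (pvSuffixB rest).getD 0 false := by
      cases h : pvSuffixB rest <;> simp [List.getD]
    cases k with
    | zero =>
      simp only [pvSuffixB, List.foldr_cons, List.getD_cons_zero, List.drop_zero, List.any_cons]
      rw [show (List.foldr (fun c acc => (acc.headD false || !PySem.Chars.islower c) :: acc) [false] rest) = pvSuffixB rest from rfl,
        hhead, ih 0]
      simp [Bool.or_comm]
    | succ k =>
      simp only [pvSuffixB, List.foldr_cons, List.getD_cons_succ, List.drop_succ_cons]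
      exact ih k

-- B's forward pass over any table with the suffix property computes A's result
theorem pv_key (cs : List Char) (T : List Bool) (n : Nat)
    (hT : ∀ k, T.getD (n + k) false = (cs.drop k).any (fun c => !PySem.Chars.islower c)) :
    (cs.zipIdx n).flatMap (fun p =>
      if PySem.Chars.isupper p.1 then
        PySem.Chars.upperChar p.1 :: (if T.getD (p.2 + 1) false then ['.'] else [])
      else []) = pvInitialsA cs := by
  induction cs generalizing n with
  | nil => simp [pvInitialsA]
  | cons c rest ih =>
    have hrest : (rest.zipIdx (n + 1)).flatMap (fun p =>
        if PySem.Chars.isupper p.1 then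
          PySem.Chars.upperChar p.1 :: (if T.getD (p.2 + 1) false then ['.'] else [])
        else []) = pvInitialsA rest := by
      apply ih
      intro k
      have := hT (k + 1)
      rwa [show n + (k + 1) = n + 1 + k by omega, List.drop_succ_cons] at this
    rw [List.zipIdx_cons, List.flatMap_cons, hrest]
    by_cases hu : PySem.Chars.isupper c = true
    · have hdot : T.getD (n + 1) false = rest.any (fun c => !PySem.Chars.islower c) := by
        have := hT 1; rwa [List.drop_succ_cons, List.drop_zero] at this
      rw [pvInitialsA]
      simp only [hu, if_true, hdot, ← pvInitialsA_dropWhile rest]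
      have hiff : rest.dropWhile PySem.Chars.islower = [] ↔
          rest.any (fun c => !PySem.Chars.islower c) = false := by
        rw [List.dropWhile_eq_nil_iff]; simp
      by_cases hr : rest.dropWhile PySem.Chars.islower = []
      · simp [hr, hiff.mp hr]
      · have : rest.any (fun c => !PySem.Chars.islower c) = true := by
          rcases Bool.eq_false_or_eq_true (rest.any (fun c => !PySem.Chars.islower c)) with h | h
          · exact h
          · exact absurd (hiff.mpr h) hr
        simp [hr, this]
    · rw [pvInitialsA]
      simp [hu]

-- ===== VERDICT (by name: the statement is the Claim_ definition above) =====
theorem initials_obtain_spec : Claim_equal_initials_obtain := by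
  intro s _
  unfold Spec_initials_obtain initials_obtain initials_obtain_alt
  exact (congrArg String.mk
    (pv_key s.toList (pvSuffixB s.toList) 0
      (fun k => by simpa using pvSuffixB_getD s.toList k))).symm
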